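-- pv_equiv track=rewrite | github.com/Nazchanel/hac-api | src/hacapi/misc.py | is_updated
-- ===== SOURCE A (Python) =====
-- def is_updated(original, new):
--     matching = True
--
--     try:
--         return_value = new.index([x for x in new if x not in original][0])
--     except IndexError:
--         matching = False
--         return_value = None
--
--     return matching, return_value
-- ===== SOURCE B (Python) =====
-- def is_updated(original, new):
--     for i, x in enumerate(new):
--         if x not in original:
--             return True, i
--     return False, None
-- ===== Notes on version B (the rewrite author's own statement) =====
-- stated objective: simpler
-- what changed: Single early-exit enumerate pass returning the first index directly, instead of materialising the full missing-element list and re-scanning new with .index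
import Mathlib
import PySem

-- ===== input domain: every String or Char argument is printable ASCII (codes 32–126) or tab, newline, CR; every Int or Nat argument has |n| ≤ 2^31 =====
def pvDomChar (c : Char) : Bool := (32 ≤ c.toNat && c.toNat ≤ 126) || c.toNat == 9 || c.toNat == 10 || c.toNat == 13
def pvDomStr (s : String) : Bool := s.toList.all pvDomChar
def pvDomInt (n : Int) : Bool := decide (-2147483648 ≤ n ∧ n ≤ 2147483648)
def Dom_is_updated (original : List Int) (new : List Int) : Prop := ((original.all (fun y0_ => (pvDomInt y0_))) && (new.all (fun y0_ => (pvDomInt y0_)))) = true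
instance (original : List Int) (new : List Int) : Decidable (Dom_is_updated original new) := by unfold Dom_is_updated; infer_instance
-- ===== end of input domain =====

-- ===== PORT A =====
-- B: one early-exit pass over `new` (simpler); A builds the full missing list then re-scans with .index.
def is_updated (original : List Int) (new : List Int) : Bool × Option Int :=
  match (new.filter (fun x => !(original.contains x))).head? with
  | some v => (true, (PySem.List.index? new v).map Int.ofNat)
  | none => (false, none)

-- ===== PORT B =====
def is_updated_alt_go (original : List Int) (new : List Int) (i : Int) : Bool × Option Int :=
  match new with
  | [] => (false, none)
  | x :: rest =>
    if !(original.contains x) then (true, some i)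
    else is_updated_alt_go original rest (i + 1)

def is_updated_alt (original : List Int) (new : List Int) : Bool × Option Int :=
  is_updated_alt_go original new 0

-- ===== PRECONDITION & SPEC =====
def Spec_is_updated (original : List Int) (new : List Int) (out : Bool × Option Int) : Prop := out = is_updated_alt original new
instance (original : List Int) (new : List Int) (out : Bool × Option Int) : Decidable (Spec_is_updated original new out) := by unfold Spec_is_updated; infer_instance

-- ===== CLAIM (what is proved, stated in full; the proofs are below) =====
def Claim_equal_is_updated : Prop := ∀ (original : List Int) (new : List Int), Dom_is_updated original new → Spec_is_updated original new (is_updated original new)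

-- ===== LEMMAS AND PROOFS =====

-- ===== VERDICT (by name: the statement is the Claim_ definition above) =====
theorem go_eq (original : List Int) (new : List Int) (k : Nat) :
    is_updated_alt_go original new (Int.ofNat k) =
      (match new.find? (fun x => !(original.contains x)) with
       | some v => (true, (PySem.List.index? new v).map (fun j => Int.ofNat (j + k)))
       | none => (false, none)) := by
  induction new generalizing k with
  | nil => simp [is_updated_alt_go]
  | cons x rest ih =>
    by_cases hx : original.contains x
    · rw [List.find?_cons_of_neg (by simpa using hx)]
      show (if (!original.contains x) = true then _ else is_updated_alt_go original rest (Int.ofNat k + 1)) = _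
      rw [if_neg (by simpa using hx), show (Int.ofNat k + 1 : Int) = Int.ofNat (k+1) from rfl, ih (k+1)]
      cases hf : rest.find? (fun x => !(original.contains x)) with
      | none => rfl
      | some v =>
        have hv : v ∉ original := by simpa using List.find?_some hf
        have hne : x ≠ v := by
          intro he; subst he; exact hv (by simpa using hx)
        simp only [PySem.List.index?_cons_of_ne rest hne]
        cases hi : PySem.List.index? rest v with
        | none => rfl
        | some j =>
          simp only [Option.map_some]
          have : j + 1 + k = j + (k + 1) := by omega
          simp [this]
    · rw [List.find?_cons_of_pos (by simpa using hx)]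
      show (if (!original.contains x) = true then (true, some (Int.ofNat k)) else _) = _
      rw [if_pos (by simpa using hx)]
      show _ = (true, Option.map (fun j => Int.ofNat (j + k)) (PySem.List.index? (x :: rest) x))
      rw [PySem.List.index?_cons_self]
      simp

theorem is_updated_spec : Claim_equal_is_updated := by
  intro original new _
  unfold Spec_is_updated is_updated is_updated_alt
  rw [List.head?_filter, show (0 : Int) = Int.ofNat 0 from rfl, go_eq original new 0]
  cases hh : new.find? (fun x => !(original.contains x)) <;> rfl
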